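-- pv_equiv track=rewrite | github.com/Chopinsky/algo-problems | challenges/1999/1982.'''FindArrGivenSubsetSums.py | recoverArray0
-- ===== SOURCE A (Python) =====
-- from typing import List
-- from collections import Counter
--
-- def recoverArray0(n: int, sums: List[int]) -> List[int]:
--   result = []
--   sums.sort()
--
--   while len(sums) > 1:
--     # either diff or -diff will be one of the numbers
--     # in the original array
--     diff = sums[-1] - sums[-2]
--     counter = Counter(sums)
--
--     # dividing the sums into 2 parts: if diff is the number,
--     # then (diff, sum+diff) must be valid as well
--     excluding = []
--     including = []
--
--     for val in sums:
--       # the number is (over-)spent, skip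
--       if counter[val] <= 0:
--         continue
--
--       # divide the pair to different sets
--       excluding.append(val)
--       including.append(val+diff)
--       counter[val] -= 1
--       counter[val+diff] -= 1
--
--     if 0 in excluding:
--       # 0 in the excluding set and it's valid
--       result.append(diff)
--       sums = excluding
--     else:
--       # 0 in the including set and it's valid
--       result.append(-1*diff)
--       sums = including
--
--   return result
-- ===== SOURCE B (Python) =====
-- from typing import List
--
-- # NOTE: like A, this sorts the caller's list in place; equivalence is about the return value.
-- def recoverArray0(n: int, sums: List[int]) -> List[int]:
--     result = []
--     sums.sort()
--     while len(sums) > 1: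
--         diff = sums[-1] - sums[-2]
--         # group the sorted list into runs (value, multiplicity)
--         runs = []
--         i = 0
--         size = len(sums)
--         while i < size:
--             j = i + 1
--             while j < size and sums[j] == sums[i]:
--                 j += 1
--             runs.append((sums[i], j - i))
--             i = j
--         # per distinct value, how many copies survive on the "excluding" side
--         kept = {}
--         excluding = []
--         including = []
--         for v, m in runs:
--             if diff == 0:
--                 k = (m + 1) // 2
--             else:
--                 k = max(0, m - kept.get(v - diff, 0))
--             kept[v] = k
--             excluding.extend([v] * k)
--             including.extend([v + diff] * k)
--         if 0 in excluding:
--             result.append(diff)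
--             sums = excluding
--         else:
--             result.append(-diff)
--             sums = including
--     return result
-- ===== Notes on version B (the rewrite author's own statement) =====
-- stated objective: alternative
-- what changed: Replaces A's per-element Counter bookkeeping (decrementing val and val+diff for every kept element) by grouping each sorted list into runs of equal values and computing each run's surviving count arithmetically via the recurrence kept(v) = max(0, m(v) - kept(v-diff)) (ceil(m/2) when diff = 0), emitting excluding/including as whole blocks.
import Mathlib
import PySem

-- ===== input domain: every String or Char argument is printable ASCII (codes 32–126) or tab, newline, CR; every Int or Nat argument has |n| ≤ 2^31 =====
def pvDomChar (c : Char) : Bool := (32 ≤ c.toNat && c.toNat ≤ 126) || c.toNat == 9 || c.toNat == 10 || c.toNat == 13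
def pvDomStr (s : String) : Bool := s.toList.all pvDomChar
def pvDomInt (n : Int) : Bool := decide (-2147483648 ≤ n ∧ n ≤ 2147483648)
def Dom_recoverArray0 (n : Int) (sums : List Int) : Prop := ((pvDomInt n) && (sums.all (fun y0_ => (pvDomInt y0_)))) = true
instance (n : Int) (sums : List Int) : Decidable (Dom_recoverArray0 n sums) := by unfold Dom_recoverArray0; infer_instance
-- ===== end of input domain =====

-- B replaces A's per-element Counter bookkeeping by an arithmetic recurrence over runs of equal
-- values (kept(v) = max(0, m(v) - kept(v-diff)), resp. ceil(m/2) when diff = 0); both A and B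
-- sort the caller's list in place (a side effect; the equivalence proved is about the return value).

-- ===== PORT A =====
-- inner `for val in sums` body: state = (counter, excluding, including)
def pvStepA (diff : Int) (st : PySem.Dict Int Int × List Int × List Int) (val : Int) :
    PySem.Dict Int Int × List Int × List Int :=
  if st.1.getD val 0 ≤ 0 then st
  else
    let c1 := st.1.modify val 0 (· - 1)
    let c2 := c1.modify (val + diff) 0 (· - 1)
    (c2, st.2.1 ++ [val], st.2.2 ++ [val + diff])

-- the `while len(sums) > 1` loop; fuel = length of the list (the loop shrinks the list each pass)
def pvLoopA : Nat → List Int → List Int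
  | 0, _ => []
  | fuel + 1, sums =>
    if 1 < sums.length then
      let diff := (PySem.List.pyGet? sums (-1)).getD 0 - (PySem.List.pyGet? sums (-2)).getD 0
      let st := sums.foldl (pvStepA diff) (PySem.Dict.counter sums, ([], []))
      if st.2.1.contains 0 then diff :: pvLoopA fuel st.2.1
      else -1 * diff :: pvLoopA fuel st.2.2
    else []

def recoverArray0 (n : Int) (sums : List Int) : List Int :=
  let s := PySem.List.sorted sums (fun x => x) false
  pvLoopA s.length s

-- ===== PORT B =====
-- group a list into runs (value, run length)
def pvRuns : List Int → List (Int × Int)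
  | [] => []
  | v :: rest =>
    (v, 1 + ((rest.takeWhile (fun x => x == v)).length : Int)) ::
      pvRuns (rest.dropWhile (fun x => x == v))
termination_by l => l.length
decreasing_by
  simp only [List.length_cons]
  exact Nat.lt_succ_of_le (List.length_dropWhile_le _ _)

-- per-run body: state = (kept, excluding, including)
def pvStepB (diff : Int) (st : PySem.Dict Int Int × List Int × List Int) (r : Int × Int) :
    PySem.Dict Int Int × List Int × List Int :=
  let k := if diff = 0 then PySem.Int.floordiv (r.2 + 1) 2
           else max 0 (r.2 - st.1.getD (r.1 - diff) 0)
  (st.1.insert r.1 k, st.2.1 ++ List.replicate k.toNat r.1,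
   st.2.2 ++ List.replicate k.toNat (r.1 + diff))

def pvLoopB : Nat → List Int → List Int
  | 0, _ => []
  | fuel + 1, sums =>
    if 1 < sums.length then
      let diff := (PySem.List.pyGet? sums (-1)).getD 0 - (PySem.List.pyGet? sums (-2)).getD 0
      let st := (pvRuns sums).foldl (pvStepB diff) (PySem.Dict.empty, ([], []))
      if st.2.1.contains 0 then diff :: pvLoopB fuel st.2.1
      else -1 * diff :: pvLoopB fuel st.2.2
    else []

def recoverArray0_alt (n : Int) (sums : List Int) : List Int :=
  let s := PySem.List.sorted sums (fun x => x) false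
  pvLoopB s.length s

-- ===== PRECONDITION & SPEC =====
def Spec_recoverArray0 (n : Int) (sums : List Int) (out : List Int) : Prop := out = recoverArray0_alt n sums
instance (n : Int) (sums : List Int) (out : List Int) : Decidable (Spec_recoverArray0 n sums out) := by unfold Spec_recoverArray0; infer_instance

-- ===== CLAIM (what is proved, stated in full; the proofs are below) =====
def Claim_equal_recoverArray0 : Prop := ∀ (n : Int) (sums : List Int), Dom_recoverArray0 n sums → Spec_recoverArray0 n sums (recoverArray0 n sums)

-- ===== LEMMAS AND PROOFS =====

-- number of elements A keeps inside one run of length m when the counter enters at c0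
-- (z = whether diff = 0, i.e. a kept element decrements its own count twice)
def pvKv : Nat → Int → Bool → Nat
  | 0, _, _ => 0
  | m + 1, c0, z => if 0 < c0 then pvKv m (c0 - if z then 2 else 1) z + 1 else pvKv m c0 z

def pvExpand (R : List (Int × Int)) : List Int := R.flatMap (fun p => List.replicate p.2.toNat p.1)

theorem pvKv_of_nonpos (m : Nat) (c0 : Int) (z : Bool) (h : c0 ≤ 0) : pvKv m c0 z = 0 := by
  induction m with
  | zero => rfl
  | succ m ih => rw [pvKv, if_neg (by omega)]; exact ih

theorem pvKv_false (m : Nat) (c0 : Int) : (pvKv m c0 false : Int) = min (m : Int) (max 0 c0) := by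
  induction m generalizing c0 with
  | zero => simp [pvKv]
  | succ m ih =>
    by_cases h : 0 < c0
    · rw [pvKv, if_pos h, show (if (false : Bool) = true then (2:Int) else 1) = 1 from rfl]
      push_cast [ih]; omega
    · rw [pvKv, if_neg h, pvKv_of_nonpos m c0 false (by omega)]
      push_cast; omega

theorem pvKv_true (m : Nat) (c0 : Int) : (pvKv m c0 true : Int) = min (m : Int) ((max 0 c0 + 1) / 2) := by
  induction m generalizing c0 with
  | zero => simp [pvKv]; omega
  | succ m ih =>
    by_cases h : 0 < c0
    · rw [pvKv, if_pos h, show (if (true : Bool) = true then (2:Int) else 1) = 2 from rfl]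
      push_cast [ih]; omega
    · rw [pvKv, if_neg h, pvKv_of_nonpos m c0 true (by omega)]
      push_cast; omega

-- A's fold over one run: keeps pvKv m c0 copies and decrements the counter accordingly
theorem pvRunA (diff : Int) (m : Nat) (v : Int) (c : PySem.Dict Int Int) (ex inc : List Int) :
    ∃ c', (List.replicate m v).foldl (pvStepA diff) (c, (ex, inc)) =
        (c', (ex ++ List.replicate (pvKv m (c.getD v 0) (decide (diff = 0))) v,
              inc ++ List.replicate (pvKv m (c.getD v 0) (decide (diff = 0))) (v + diff))) ∧
      ∀ w, c'.getD w 0 = c.getD w 0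
          - (if w = v then (pvKv m (c.getD v 0) (decide (diff = 0)) : Int) else 0)
          - (if w = v + diff then (pvKv m (c.getD v 0) (decide (diff = 0)) : Int) else 0) := by
  induction m generalizing c ex inc with
  | zero =>
    refine ⟨c, by simp [pvKv], fun w => by simp [pvKv]⟩
  | succ m ih =>
    rw [List.replicate_succ, List.foldl_cons]
    by_cases hle : c.getD v 0 ≤ 0
    · rw [show pvStepA diff (c, (ex, inc)) v = (c, (ex, inc)) from by simp [pvStepA, hle]]
      rw [pvKv, if_neg (by omega)]
      exact ih c ex inc
    · set c2 := (c.modify v 0 (· - 1)).modify (v + diff) 0 (· - 1) with hc2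
      rw [show pvStepA diff (c, (ex, inc)) v = (c2, (ex ++ [v], inc ++ [v + diff])) from by
        simp [pvStepA, hle, hc2]]
      have hc2v : c2.getD v 0 =
          c.getD v 0 - (if decide (diff = 0) then (2:Int) else 1) := by
        by_cases hd : diff = 0
        · simp [hc2, hd, PySem.Dict.getD_modify]; ring
        · rw [hc2, PySem.Dict.getD_modify, if_neg (by omega), PySem.Dict.getD_modify,
            if_pos rfl]
          simp [hd]
      have hc2w : ∀ w, c2.getD w 0 = c.getD w 0 - (if w = v then (1:Int) else 0)
          - (if w = v + diff then (1:Int) else 0) := by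
        intro w
        by_cases h1 : w = v + diff <;> by_cases h2 : w = v <;> by_cases hd : diff = 0 <;>
          simp [hc2, PySem.Dict.getD_modify, h1, h2, hd] <;> (try ring) <;> omega
      obtain ⟨c', h1, h2⟩ := ih c2 (ex ++ [v]) (inc ++ [v + diff])
      rw [pvKv, if_pos (by omega), ← hc2v]
      refine ⟨c', ?_, ?_⟩
      · rw [h1]
        simp [List.replicate_succ, List.append_assoc]
      · intro w
        rw [h2 w, hc2w w]
        push_cast
        by_cases h1 : w = v + diff <;> by_cases h2 : w = v <;> by_cases hd : diff = 0 <;>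
          simp [h1, h2, hd] <;> (try ring) <;> omega

-- the central simulation: A's per-element pass over the flattened runs produces the same
-- (excluding, including) pair as B's per-run pass
theorem pvPass (diff : Int) (R : List (Int × Int)) (c keptD : PySem.Dict Int Int)
    (ex inc : List Int)
    (hinc : (R.map Prod.fst).Pairwise (· < ·))
    (hpos : ∀ p ∈ R, 1 ≤ p.2)
    (hkept0 : ∀ p ∈ R, keptD.getD p.1 0 = 0)
    (hc : ∀ p ∈ R, c.getD p.1 0 = p.2 - keptD.getD (p.1 - diff) 0)
    (hknn : ∀ w, 0 ≤ keptD.getD w 0) :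
    ((pvExpand R).foldl (pvStepA diff) (c, (ex, inc))).2 =
      (R.foldl (pvStepB diff) (keptD, (ex, inc))).2 := by
  induction R generalizing c keptD ex inc with
  | nil => rfl
  | cons p R' ih =>
    obtain ⟨v, m⟩ := p
    have hm : (1:Int) ≤ m := hpos (v, m) (by simp)
    have hK : c.getD v 0 = m - keptD.getD (v - diff) 0 := by simpa using hc (v, m) (by simp)
    have hkv0 : keptD.getD v 0 = 0 := by simpa using hkept0 (v, m) (by simp)
    have hvlt : ∀ p ∈ R', v < p.1 := by
      have := hinc
      simp only [List.map_cons, List.pairwise_cons] at this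
      intro p hp
      exact this.1 p.1 (List.mem_map_of_mem hp)
    set K := keptD.getD (v - diff) 0 with hKdef
    set k : Int := if diff = 0 then PySem.Int.floordiv (m + 1) 2 else max 0 (m - K) with hkdef
    have hKnn : 0 ≤ K := hknn _
    have hknn2 : 0 ≤ k := by
      rw [hkdef]
      split_ifs with hd
      · rw [PySem.Int.floordiv_eq_ediv_of_pos (by omega)]; omega
      · omega
    have hkeq : (pvKv m.toNat (c.getD v 0) (decide (diff = 0)) : Int) = k := by
      by_cases hd : diff = 0
      · have hK0 : K = 0 := by rw [hKdef, hd, sub_zero]; exact hkv0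
        rw [show decide (diff = 0) = true by simp [hd], pvKv_true, hkdef, if_pos hd,
          PySem.Int.floordiv_eq_ediv_of_pos (by omega), hK, hK0]
        omega
      · rw [show decide (diff = 0) = false by simp [hd], pvKv_false, hkdef, if_neg hd, hK]
        omega
    obtain ⟨c', hfold, hgetD⟩ := pvRunA diff m.toNat v c ex inc
    have hkvnat : pvKv m.toNat (c.getD v 0) (decide (diff = 0)) = k.toNat := by omega
    have hstepB : pvStepB diff (keptD, (ex, inc)) (v, m) =
        (keptD.insert v k, (ex ++ List.replicate k.toNat v,
          inc ++ List.replicate k.toNat (v + diff))) := by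
      simp only [pvStepB]
      rw [← hKdef, ← hkdef]
    have hexp : pvExpand ((v, m) :: R') = List.replicate m.toNat v ++ pvExpand R' := by
      simp [pvExpand]
    rw [hexp, List.foldl_append, hfold, hkvnat, List.foldl_cons, hstepB]
    refine ih c' (keptD.insert v k) _ _ ?_ ?_ ?_ ?_ ?_
    · simpa using (List.pairwise_cons.mp (by simpa using hinc)).2
    · exact fun p hp => hpos p (List.mem_cons_of_mem _ hp)
    · intro p hp
      rw [PySem.Dict.getD_insert, if_neg (by have := hvlt p hp; omega)]
      exact hkept0 p (List.mem_cons_of_mem _ hp)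
    · intro p hp
      have hne : p.1 ≠ v := by have := hvlt p hp; omega
      rw [hgetD p.1, if_neg hne, PySem.Dict.getD_insert, hc p (List.mem_cons_of_mem _ hp)]
      by_cases he : p.1 - diff = v
      · rw [if_pos he, if_pos (show p.1 = v + diff by omega), he, hkv0]
        omega
      · rw [if_neg he, if_neg (show ¬ p.1 = v + diff by intro hcon; exact he (by omega))]
        ring
    · intro w
      rw [PySem.Dict.getD_insert]
      split_ifs with hw
      · exact hknn2
      · exact hknn w

-- elements surviving dropWhile (== v) in a sorted tail are strictly above v
theorem pvDrop_lt (v : Int) (rest : List Int) (h : rest.Pairwise (· ≤ ·))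
    (hge : ∀ x ∈ rest, v ≤ x) :
    ∀ x ∈ rest.dropWhile (fun x => x == v), v < x := by
  intro x hx
  rcases hd : rest.dropWhile (fun x => x == v) with _ | ⟨h0, d'⟩
  · rw [hd] at hx; cases hx
  · have hh0 : ¬ (h0 == v) = true := by
      have := List.dropWhile_get_zero_not (fun x => x == v) rest (by rw [hd]; simp)
      simpa [hd] using this
    have hh0m : h0 ∈ rest := (List.dropWhile_sublist _).subset (by rw [hd]; simp)
    have hh0v : v < h0 := lt_of_le_of_ne (hge h0 hh0m) (fun he => hh0 (by simp [he.symm]))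
    rw [hd] at hx
    rcases List.mem_cons.mp hx with hx | hx
    · exact hx ▸ hh0v
    · have hsorted : (h0 :: d').Pairwise (· ≤ ·) :=
        hd ▸ (h.sublist (List.dropWhile_sublist _))
      exact lt_of_lt_of_le hh0v ((List.pairwise_cons.mp hsorted).1 x hx)

theorem pvTake_eq (v : Int) (rest : List Int) :
    rest.takeWhile (fun x => x == v) =
      List.replicate (rest.takeWhile (fun x => x == v)).length v := by
  exact List.eq_replicate_of_mem fun b hb => by simpa using List.mem_takeWhile_imp hb

theorem pvRuns_flatten (l : List Int) : pvExpand (pvRuns l) = l := by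
  induction l using pvRuns.induct with
  | case1 => simp [pvRuns, pvExpand]
  | case2 v rest ih =>
    rw [pvRuns]
    simp only [pvExpand, List.flatMap_cons] at *
    rw [show ((1:Int) + ((rest.takeWhile (fun x => x == v)).length : Int)).toNat
        = (rest.takeWhile (fun x => x == v)).length + 1 by omega]
    rw [List.replicate_succ, ← pvTake_eq, ih]
    simp [List.takeWhile_append_dropWhile]

theorem pvRuns_pos (l : List Int) : ∀ p ∈ pvRuns l, 1 ≤ p.2 := by
  induction l using pvRuns.induct with
  | case1 => simp [pvRuns]
  | case2 v rest ih =>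
    rw [pvRuns]
    intro p hp
    rcases List.mem_cons.mp hp with hp | hp
    · subst hp; dsimp only; omega
    · exact ih p hp

theorem pvRuns_mem (l : List Int) : ∀ p ∈ pvRuns l, p.1 ∈ l := by
  induction l using pvRuns.induct with
  | case1 => simp [pvRuns]
  | case2 v rest ih =>
    rw [pvRuns]
    intro p hp
    rcases List.mem_cons.mp hp with hp | hp
    · subst hp; simp
    · exact List.mem_cons_of_mem _
        ((List.dropWhile_sublist _).subset (ih p hp))

theorem pvRuns_inc (l : List Int) (h : l.Pairwise (· ≤ ·)) :
    ((pvRuns l).map Prod.fst).Pairwise (· < ·) := by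
  induction l using pvRuns.induct with
  | case1 => simp [pvRuns]
  | case2 v rest ih =>
    rw [pvRuns]
    obtain ⟨hge, hrest⟩ := List.pairwise_cons.mp h
    have hdrop := pvDrop_lt v rest hrest hge
    simp only [List.map_cons, List.pairwise_cons]
    refine ⟨?_, ih (hrest.sublist (List.dropWhile_sublist _))⟩
    intro a ha
    obtain ⟨p, hp, rfl⟩ := List.mem_map.mp ha
    exact hdrop p.1 (pvRuns_mem _ p hp)

theorem pvRuns_count (l : List Int) (h : l.Pairwise (· ≤ ·)) :
    ∀ p ∈ pvRuns l, l.count p.1 = p.2 := by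
  induction l using pvRuns.induct with
  | case1 => simp [pvRuns]
  | case2 v rest ih =>
    rw [pvRuns]
    obtain ⟨hge, hrest⟩ := List.pairwise_cons.mp h
    have hdrop := pvDrop_lt v rest hrest hge
    have hsplit : rest = rest.takeWhile (fun x => x == v) ++ rest.dropWhile (fun x => x == v) :=
      (List.takeWhile_append_dropWhile).symm
    intro p hp
    rcases List.mem_cons.mp hp with hp | hp
    · subst hp
      have h1 : (rest.takeWhile (fun x => x == v)).count v =
          (rest.takeWhile (fun x => x == v)).length := by
        conv_lhs => rw [pvTake_eq v rest]
        simp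
      have h2 : (rest.dropWhile (fun x => x == v)).count v = 0 := by
        rw [List.count_eq_zero]
        intro hm
        have := hdrop v hm; omega
      have h3 : rest.count v = (rest.takeWhile (fun x => x == v)).length := by
        conv_lhs => rw [hsplit]
        rw [List.count_append, h1, h2]
        omega
      simp only [List.count_cons_self, h3]
      push_cast; ring
    · have hplt : v < p.1 := hdrop p.1 (pvRuns_mem _ p hp)
      have h1 : (rest.takeWhile (fun x => x == v)).count p.1 = 0 := by
        rw [List.count_eq_zero]
        intro hm
        rw [pvTake_eq v rest] at hm
        have := List.eq_of_mem_replicate hm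
        omega
      have h3 : rest.count p.1 = (rest.dropWhile (fun x => x == v)).count p.1 := by
        conv_lhs => rw [hsplit]
        rw [List.count_append, h1]
        omega
      rw [List.count_cons, if_neg (by simp only [beq_iff_eq]; omega), Nat.add_zero, h3]
      exact ih (hrest.sublist (List.dropWhile_sublist _)) p hp

-- B's outputs stay sorted (run values strictly increase)
theorem pvSortB (diff : Int) (R : List (Int × Int)) (keptD : PySem.Dict Int Int)
    (ex inc : List Int)
    (hinc : (R.map Prod.fst).Pairwise (· < ·))
    (hex : ex.Pairwise (· ≤ ·)) (hinc2 : inc.Pairwise (· ≤ ·))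
    (hbex : ∀ x ∈ ex, ∀ p ∈ R, x ≤ p.1)
    (hbinc : ∀ x ∈ inc, ∀ p ∈ R, x ≤ p.1 + diff) :
    (R.foldl (pvStepB diff) (keptD, (ex, inc))).2.1.Pairwise (· ≤ ·) ∧
      (R.foldl (pvStepB diff) (keptD, (ex, inc))).2.2.Pairwise (· ≤ ·) := by
  induction R generalizing keptD ex inc with
  | nil => exact ⟨hex, hinc2⟩
  | cons q R' ih =>
    obtain ⟨v, m⟩ := q
    have hvlt : ∀ p ∈ R', v < p.1 := by
      simp only [List.map_cons, List.pairwise_cons] at hinc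
      exact fun p hp => hinc.1 p.1 (List.mem_map_of_mem hp)
    rw [List.foldl_cons]
    set kI : Int := if diff = 0 then PySem.Int.floordiv (m + 1) 2
        else max 0 (m - keptD.getD (v - diff) 0) with hkI
    have hstep : pvStepB diff (keptD, (ex, inc)) (v, m) =
        (keptD.insert v kI, (ex ++ List.replicate kI.toNat v,
          inc ++ List.replicate kI.toNat (v + diff))) := by
      simp only [pvStepB]
      rw [← hkI]
    rw [hstep]
    refine ih (keptD.insert v kI) _ _ ?_ ?_ ?_ ?_ ?_
    · simpa using (List.pairwise_cons.mp (by simpa using hinc)).2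
    · rw [List.pairwise_append]
      refine ⟨hex, List.pairwise_replicate_of_refl, ?_⟩
      intro x hx y hy
      rw [List.eq_of_mem_replicate hy]
      exact hbex x hx (v, m) (List.mem_cons_self)
    · rw [List.pairwise_append]
      refine ⟨hinc2, List.pairwise_replicate_of_refl, ?_⟩
      intro x hx y hy
      rw [List.eq_of_mem_replicate hy]
      exact hbinc x hx (v, m) (List.mem_cons_self)
    · intro x hx p hp
      rcases List.mem_append.mp hx with hx | hx
      · exact hbex x hx p (List.mem_cons_of_mem _ hp)
      · rw [List.eq_of_mem_replicate hx]
        exact le_of_lt (hvlt p hp)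
    · intro x hx p hp
      rcases List.mem_append.mp hx with hx | hx
      · exact hbinc x hx p (List.mem_cons_of_mem _ hp)
      · rw [List.eq_of_mem_replicate hx]
        have := hvlt p hp
        omega

theorem pvLoop_eq (fuel : Nat) (s : List Int) (h : s.Pairwise (· ≤ ·)) :
    pvLoopA fuel s = pvLoopB fuel s := by
  induction fuel generalizing s with
  | zero => rfl
  | succ fuel ih =>
    rw [pvLoopA, pvLoopB]
    by_cases hlen : 1 < s.length
    · simp only [if_pos hlen]
      set diff := (PySem.List.pyGet? s (-1)).getD 0 - (PySem.List.pyGet? s (-2)).getD 0 with hdiff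
      have hpass := pvPass diff (pvRuns s) (PySem.Dict.counter s) PySem.Dict.empty [] []
        (pvRuns_inc s h) (pvRuns_pos s)
        (fun p hp => by simp [PySem.Dict.getD_empty])
        (fun p hp => by
          rw [PySem.Dict.getD_counter, pvRuns_count s h p hp]
          simp [PySem.Dict.getD_empty])
        (fun w => by simp [PySem.Dict.getD_empty])
      rw [pvRuns_flatten] at hpass
      have h1 := congrArg Prod.fst hpass
      have h2 := congrArg Prod.snd hpass
      have hsorted := pvSortB diff (pvRuns s) PySem.Dict.empty [] []
        (pvRuns_inc s h) (List.Pairwise.nil) (List.Pairwise.nil)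
        (by intro x hx; cases hx) (by intro x hx; cases hx)
      rw [h1, h2]
      by_cases hc : ((pvRuns s).foldl (pvStepB diff) (PySem.Dict.empty, ([], []))).2.1.contains 0
      · rw [if_pos hc, if_pos hc, ih _ hsorted.1]
      · rw [if_neg hc, if_neg hc, ih _ hsorted.2]
    · simp only [if_neg hlen]

-- ===== VERDICT (by name: the statement is the Claim_ definition above) =====
theorem recoverArray0_spec : Claim_equal_recoverArray0 := by
  intro n sums _
  unfold Spec_recoverArray0 recoverArray0 recoverArray0_alt
  exact pvLoop_eq _ _ (by simpa using PySem.List.sorted_pairwise sums (fun x => x))
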